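-- pv_equiv track=rewrite | github.com/sungjk0706/SectorFlow | backend/app/services/trade_history.py | _trim_expired
-- ===== SOURCE A (Python) =====
-- from collections import defaultdict
--
-- RETENTION_TRADING_DAYS_TEST: int = 60
--
-- RETENTION_TRADING_DAYS_REAL: int = 5
--
-- def _compute_retained_dates(records: list[dict]) -> dict[str, set[str]]:
--     """모드별 보관할 날짜 set 계산.
--
--     각 레코드의 trade_mode별로 고유 date를 수집하고,
--     최근 N개 날짜만 유지한다 (test=60, real=5).
--     trade_mode 누락 시 "test"로 간주.
--     """
--     dates_by_mode: dict[str, set[str]] = defaultdict(set)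
--     for rec in records:
--         date_val = rec.get("date", "")
--         if not date_val:
--             continue
--         mode = rec.get("trade_mode") or "test"
--         dates_by_mode[mode].add(date_val)
--
--     retained: dict[str, set[str]] = {}
--     for mode, dates in dates_by_mode.items():
--         limit = RETENTION_TRADING_DAYS_TEST if mode == "test" else RETENTION_TRADING_DAYS_REAL
--         sorted_dates = sorted(dates, reverse=True)[:limit]
--         retained[mode] = set(sorted_dates)
--     return retained
--
-- def _trim_expired(records: list[dict]) -> list[dict]:
--     """보관 기한 초과 레코드 제거. 모드별 독립 적용.
--
--     - date 필드 누락/빈 값 → 제거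
--     - 해당 모드에 레코드가 전혀 없으면 삭제 없음
--     - 원본 불변, 새 리스트 반환, 원래 순서 유지
--     """
--     retained = _compute_retained_dates(records)
--     result: list[dict] = []
--     for rec in records:
--         date_val = rec.get("date", "")
--         if not date_val:
--             continue
--         mode = rec.get("trade_mode") or "test"
--         mode_dates = retained.get(mode)
--         if mode_dates is None:
--             # 해당 모드에 레코드가 없는 경우 (이론상 도달 불가하지만 안전장치)
--             result.append(rec)
--             continue
--         if date_val in mode_dates:
--             result.append(rec)
--     return result
-- ===== SOURCE B (Python) =====
-- from collections import defaultdict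
--
-- RETENTION_TRADING_DAYS_TEST: int = 60
--
-- RETENTION_TRADING_DAYS_REAL: int = 5
--
-- def _trim_expired(records: list[dict]) -> list[dict]:
--     """Sort-free variant: a record is retained iff fewer than `limit` distinct
--     dates of its mode are strictly newer than its own date (same top-N rule,
--     no sorting, no retained-set dict)."""
--     dates_by_mode: dict[str, set[str]] = defaultdict(set)
--     for rec in records:
--         date_val = rec.get("date", "")
--         if not date_val:
--             continue
--         mode = rec.get("trade_mode") or "test"
--         dates_by_mode[mode].add(date_val)
--
--     result: list[dict] = []
--     for rec in records:
--         date_val = rec.get("date", "")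
--         if not date_val:
--             continue
--         mode = rec.get("trade_mode") or "test"
--         limit = RETENTION_TRADING_DAYS_TEST if mode == "test" else RETENTION_TRADING_DAYS_REAL
--         newer = sum(1 for x in dates_by_mode[mode] if x > date_val)
--         if newer < limit:
--             result.append(rec)
--     return result
-- ===== Notes on version B (the rewrite author's own statement) =====
-- stated objective: alternative
-- what changed: B drops A's _compute_retained_dates machinery (per-mode descending sort, top-N slice, retained-set dict, membership test) and instead keeps a record iff fewer than the mode's limit of distinct dates in its mode are strictly newer than its own date.
import Mathlib
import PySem

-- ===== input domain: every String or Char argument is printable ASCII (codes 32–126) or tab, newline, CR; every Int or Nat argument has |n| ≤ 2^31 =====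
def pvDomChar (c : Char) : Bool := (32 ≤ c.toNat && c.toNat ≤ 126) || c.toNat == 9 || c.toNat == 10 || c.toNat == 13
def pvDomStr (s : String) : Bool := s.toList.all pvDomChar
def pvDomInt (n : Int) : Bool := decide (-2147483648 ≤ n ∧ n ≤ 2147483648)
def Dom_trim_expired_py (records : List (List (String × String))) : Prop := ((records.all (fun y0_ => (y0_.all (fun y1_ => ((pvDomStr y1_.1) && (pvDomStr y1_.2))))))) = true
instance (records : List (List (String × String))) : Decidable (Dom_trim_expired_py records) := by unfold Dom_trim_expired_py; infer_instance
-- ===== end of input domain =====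

-- B replaces A's retained-set machinery (per-mode sort + slice + set + second dict) by a direct
-- count of strictly-newer distinct dates compared against the mode's limit; objective: alternative.

-- ===== PORT A =====
-- rec.get("date", "")
def recDate (rec : List (String × String)) : String :=
  PySem.Dict.getD (PySem.Dict.mk rec) "date" ""

-- rec.get("trade_mode") or "test"   (Python `or`: empty string is falsy)
def recMode (rec : List (String × String)) : String :=
  match PySem.Dict.get? (PySem.Dict.mk rec) "trade_mode" with
  | none => "test"
  | some s => if s = "" then "test" else s

-- one iteration of the first loop (identical in both Python sources):
-- defaultdict access dates_by_mode[mode].add(date_val) = modify with default set()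
def dbmStep (d : PySem.Dict String (PySem.Set String)) (rec : List (String × String)) :
    PySem.Dict String (PySem.Set String) :=
  let dv := recDate rec
  if dv = "" then d
  else PySem.Dict.modify d (recMode rec) [] (fun s => PySem.Set.add s dv)

-- dates_by_mode after the first loop (shared verbatim by A and B)
def datesByMode (records : List (List (String × String))) : PySem.Dict String (PySem.Set String) :=
  records.foldl dbmStep PySem.Dict.empty

def trim_expired_py (records : List (List (String × String))) : List (List (String × String)) :=
  let dates := datesByMode records
  -- second loop of _compute_retained_dates: for mode, dates in items: retained[mode] = set(sorted(dates, reverse=True)[:limit])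
  let retained : PySem.Dict String (PySem.Set String) :=
    dates.items.foldl (fun r p =>
      let limit : Int := if p.1 = "test" then 60 else 5
      r.insert p.1 (PySem.Set.ofList
        (PySem.List.slice (PySem.List.sorted p.2 (fun x => x) true) none (some limit)))) PySem.Dict.empty
  -- the filter loop of _trim_expired
  records.foldl (fun res rec =>
    let dv := recDate rec
    if dv = "" then res
    else
      match PySem.Dict.get? retained (recMode rec) with
      | none => res ++ [rec]
      | some s => if PySem.Set.contains s dv then res ++ [rec] else res) []

-- ===== PORT B =====
def trim_expired_py_alt (records : List (List (String × String))) : List (List (String × String)) :=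
  let dates := datesByMode records
  records.foldl (fun res rec =>
    let dv := recDate rec
    if dv = "" then res
    else
      let m := recMode rec
      let limit : Int := if m = "test" then 60 else 5
      -- newer = sum(1 for x in dates_by_mode[m] if x > date_val); the key m is always present,
      -- so defaultdict indexing is getD (order of the set iteration cannot affect the sum)
      let newer : Int := (PySem.Dict.getD dates m []).foldl
        (fun acc x => if dv < x then acc + 1 else acc) 0
      if newer < limit then res ++ [rec] else res) []

-- ===== PRECONDITION & SPEC =====
def Spec_trim_expired_py (records : List (List (String × String))) (out : List (List (String × String))) : Prop := out = trim_expired_py_alt records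
instance (records : List (List (String × String))) (out : List (List (String × String))) : Decidable (Spec_trim_expired_py records out) := by unfold Spec_trim_expired_py; infer_instance

-- ===== CLAIM (what is proved, stated in full; the proofs are below) =====
def Claim_equal_trim_expired_py : Prop := ∀ (records : List (List (String × String))), Dom_trim_expired_py records → Spec_trim_expired_py records (trim_expired_py records)

-- ===== LEMMAS AND PROOFS =====

lemma dbmStep_of_eq (d : PySem.Dict String (PySem.Set String)) (rec : List (String × String))
    (h : recDate rec = "") : dbmStep d rec = d := by simp [dbmStep, h]

lemma dbmStep_of_ne (d : PySem.Dict String (PySem.Set String)) (rec : List (String × String))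
    (h : recDate rec ≠ "") :
    dbmStep d rec = PySem.Dict.modify d (recMode rec) [] (fun s => PySem.Set.add s (recDate rec)) := by
  simp [dbmStep, h]

-- keys of a modify stay Nodup
lemma keys_nodup_modify (d : PySem.Dict String (PySem.Set String)) (k : String)
    (f : PySem.Set String → PySem.Set String) (h : d.keys.Nodup) :
    (d.modify k ([] : PySem.Set String) f).keys.Nodup := by
  rw [PySem.Dict.keys_modify]
  by_cases hc : d.contains k = true
  · rw [PySem.Dict.keys_insert_of_contains d _ hc]; exact h
  · have hc' : d.contains k = false := by simpa using hc
    rw [PySem.Dict.keys_insert_of_not_contains d _ hc']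
    refine List.Nodup.append h (List.nodup_singleton k) ?_
    intro a ha hb
    rcases List.mem_singleton.mp hb with rfl
    have : d.contains a = true := (PySem.Dict.contains_iff_mem_keys d a).mpr ha
    exact hc this

-- invariant of the first loop: keys Nodup and every (getD · []) value Nodup
lemma dbm_inv (l : List (List (String × String))) (d : PySem.Dict String (PySem.Set String))
    (hk : d.keys.Nodup) (hv : ∀ k, (d.getD k ([] : PySem.Set String)).Nodup) :
    (l.foldl dbmStep d).keys.Nodup ∧
      ∀ k, ((l.foldl dbmStep d).getD k ([] : PySem.Set String)).Nodup := by
  induction l generalizing d with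
  | nil => exact ⟨hk, hv⟩
  | cons rec t ih =>
    simp only [List.foldl_cons]
    by_cases hdv : recDate rec = ""
    · rw [dbmStep_of_eq d rec hdv]; exact ih d hk hv
    · rw [dbmStep_of_ne d rec hdv]
      refine ih _ (keys_nodup_modify d (recMode rec) _ hk) ?_
      intro k
      rw [PySem.Dict.getD_modify]
      split_ifs with h
      · exact PySem.Set.nodup_add _ _ (hv _)
      · exact hv k

-- membership in a mode's set is preserved by the rest of the loop
lemma dbm_mono (l : List (List (String × String))) (d : PySem.Dict String (PySem.Set String))
    (k x : String) (h : x ∈ d.getD k ([] : PySem.Set String)) :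
    x ∈ (l.foldl dbmStep d).getD k ([] : PySem.Set String) := by
  induction l generalizing d with
  | nil => exact h
  | cons rec t ih =>
    simp only [List.foldl_cons]
    refine ih _ ?_
    by_cases hdv : recDate rec = ""
    · rw [dbmStep_of_eq d rec hdv]; exact h
    · rw [dbmStep_of_ne d rec hdv, PySem.Dict.getD_modify]
      split_ifs with hk
      · subst hk; exact (PySem.Set.mem_add _ _ _).mpr (Or.inl h)
      · exact h

-- every record with a nonempty date contributed its date to its mode's set
lemma dbm_contrib (l : List (List (String × String))) (d : PySem.Dict String (PySem.Set String))
    (rec : List (String × String)) (hrec : rec ∈ l) (hdv : recDate rec ≠ "") :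
    recDate rec ∈ (l.foldl dbmStep d).getD (recMode rec) ([] : PySem.Set String) := by
  induction l generalizing d with
  | nil => cases hrec
  | cons r t ih =>
    simp only [List.foldl_cons]
    rcases List.mem_cons.mp hrec with rfl | hmem
    · refine dbm_mono t _ _ _ ?_
      rw [dbmStep_of_ne d rec hdv, PySem.Dict.getD_modify_self]
      exact (PySem.Set.mem_add _ _ _).mpr (Or.inr rfl)
    · exact ih _ hmem

-- the retained dict of port A, looked up at a key of dates
lemma retained_get (dates : PySem.Dict String (PySem.Set String)) (hk : dates.keys.Nodup)
    (m : String) (s : PySem.Set String) (hget : dates.get? m = some s)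
    (g : String → PySem.Set String → PySem.Set String) :
    (dates.items.foldl (fun r p => r.insert p.1 (g p.1 p.2)) PySem.Dict.empty).get? m
      = some (g m s) := by
  have hnd : (dates.items.map (fun p => p.1)).Nodup := by
    simpa [PySem.Dict.keys] using hk
  have hitems := PySem.Dict.items_foldl_insert_fresh dates.items (fun p => p.1)
      (fun p => g p.1 p.2) PySem.Dict.empty
      (fun a _ => PySem.Dict.contains_empty a.1) hnd
  refine PySem.Dict.get?_of_mem_items _ ?_ ?_
  · rw [hitems]
    exact List.mem_append_right _ (List.mem_map.mpr
      ⟨(m, s), PySem.Dict.mem_items_of_get?_eq_some _ hget, rfl⟩)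
  · have hempty : (PySem.Dict.empty : PySem.Dict String (PySem.Set String)).items = [] := rfl
    have hkeq : (dates.items.foldl (fun r p => r.insert p.1 (g p.1 p.2)) PySem.Dict.empty).keys
        = dates.items.map (fun p => p.1) := by
      simp only [PySem.Dict.keys, hitems, hempty, List.nil_append, List.map_map]
      simp [Function.comp_def]
    rw [hkeq]; exact hnd

-- core: membership in the top-n prefix of the strictly descending list ↔ fewer than n strictly greater
lemma take_mem_iff (L : List String) (hp : L.Pairwise (fun a b => b < a)) (d : String)
    (hd : d ∈ L) (n : Nat) :
    d ∈ L.take n ↔ L.countP (fun x => decide (d < x)) < n := by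
  induction L generalizing n with
  | nil => cases hd
  | cons a t ih =>
    rcases List.pairwise_cons.mp hp with ⟨ha, hpt⟩
    cases n with
    | zero => simp
    | succ n =>
      simp only [List.take_succ_cons, List.countP_cons, List.mem_cons]
      rcases List.mem_cons.mp hd with rfl | hdt
      · have h0 : t.countP (fun x => decide (d < x)) = 0 :=
          List.countP_eq_zero.mpr (fun x hx => by simp [not_lt.mpr (le_of_lt (ha x hx))])
        have hpd : (decide (d < d)) = false := by simp
        rw [h0, hpd]
        simp
      · have hda : d < a := ha d hdt
        have hne : d ≠ a := ne_of_lt hda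
        have hpa : (decide (d < a)) = true := by simpa using hda
        rw [hpa, or_iff_right hne, ih hpt hdt n]
        simp only [if_true]
        omega

-- the step functions of the two filter loops agree on every record of the list
lemma step_agree (records : List (List (String × String))) (rec : List (String × String))
    (hrec : rec ∈ records) (res : List (List (String × String))) :
    (let dv := recDate rec
     if dv = "" then res
     else
       match PySem.Dict.get? ((datesByMode records).items.foldl (fun r p =>
           let limit : Int := if p.1 = "test" then 60 else 5
           r.insert p.1 (PySem.Set.ofList
             (PySem.List.slice (PySem.List.sorted p.2 (fun x => x) true) none (some limit))))
           PySem.Dict.empty) (recMode rec) with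
       | none => res ++ [rec]
       | some s => if PySem.Set.contains s dv then res ++ [rec] else res)
    = (let dv := recDate rec
       if dv = "" then res
       else
         let m := recMode rec
         let limit : Int := if m = "test" then 60 else 5
         let newer : Int := (PySem.Dict.getD (datesByMode records) m []).foldl
           (fun acc x => if dv < x then acc + 1 else acc) 0
         if newer < limit then res ++ [rec] else res) := by
  by_cases hdv : recDate rec = ""
  · simp [hdv]
  · simp only [if_neg hdv]
    set dates := datesByMode records with hdates
    set dv := recDate rec with hdvdef
    set m := recMode rec with hmdef
    obtain ⟨hknd, hvnd⟩ := dbm_inv records PySem.Dict.empty (by simp [PySem.Dict.keys_empty])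
      (fun k => by simp [PySem.Dict.getD_empty])
    have hmem : dv ∈ dates.getD m ([] : PySem.Set String) :=
      dbm_contrib records PySem.Dict.empty rec hrec hdv
    set s := dates.getD m ([] : PySem.Set String) with hs
    have hcont : dates.contains m = true := by
      by_contra hc
      rw [PySem.Dict.getD_of_not_contains dates ([] : PySem.Set String) (by simpa using hc)] at hs
      rw [hs] at hmem
      cases hmem
    have hget : dates.get? m = some s := by
      rw [PySem.Dict.contains_eq_isSome_get?] at hcont
      cases hg : dates.get? m with
      | none => rw [hg] at hcont; cases hcont
      | some v => rw [hs, PySem.Dict.getD_eq_get?_getD, hg]; rfl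
    rw [retained_get dates hknd m s hget
      (fun k t => PySem.Set.ofList (PySem.List.slice (PySem.List.sorted t (fun x => x) true) none
        (some (if k = "test" then (60 : Int) else 5))))]
    -- both branches are now decided by the same count comparison
    set lim : Int := if m = "test" then (60 : Int) else 5 with hlim
    have hlimpos : 0 < lim := by rw [hlim]; split <;> norm_num
    set L := PySem.List.sorted s (fun x => x) true with hL
    have hLperm : L.Perm s := PySem.List.sorted_perm s (fun x => x) true
    have hLnd : L.Nodup := hLperm.nodup_iff.mpr (hvnd m)
    have hLp : L.Pairwise (fun a b => b < a) := by
      have h1 : L.Pairwise (fun a b : String => b ≤ a) :=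
        PySem.List.sorted_pairwise_rev s (fun x => x)
      exact (List.Pairwise.and h1 hLnd).imp (fun h => lt_of_le_of_ne h.1 (Ne.symm h.2))
    have hdL : dv ∈ L := (PySem.List.mem_sorted s (fun x => x) true dv).mpr hmem
    have hslice : PySem.List.slice L none (some lim) = L.take lim.toNat :=
      PySem.List.slice_to L (le_of_lt hlimpos)
    rw [hslice, PySem.List.foldl_ite_add_one (fun x => dv < x) s 0]
    have hiff : dv ∈ L.take lim.toNat ↔ (0 + (s.countP (fun x => decide (dv < x)) : Int)) < lim := by
      rw [take_mem_iff L hLp dv hdL lim.toNat, hLperm.countP_eq]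
      omega
    show (if (PySem.Set.ofList (L.take lim.toNat)).contains dv = true then res ++ [rec] else res)
      = _
    by_cases hin : dv ∈ L.take lim.toNat
    · have hc : PySem.Set.contains (PySem.Set.ofList (L.take lim.toNat)) dv = true :=
        (PySem.Set.contains_iff _ _).mpr ((PySem.Set.mem_ofList _ _).mpr hin)
      rw [if_pos hc, if_pos (hiff.mp hin)]
    · have hc : ¬ PySem.Set.contains (PySem.Set.ofList (L.take lim.toNat)) dv = true :=
        fun h => hin ((PySem.Set.mem_ofList _ _).mp ((PySem.Set.contains_iff _ _).mp h))
      rw [if_neg hc, if_neg (fun h => hin (hiff.mpr h))]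

-- ===== VERDICT (by name: the statement is the Claim_ definition above) =====
theorem trim_expired_py_spec : Claim_equal_trim_expired_py := by
  intro records _
  unfold Spec_trim_expired_py trim_expired_py trim_expired_py_alt
  exact PySem.List.foldl_congr_mem' records _ _ []
    (fun rec hrec res => step_agree records rec hrec res)
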